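-- pv_equiv track=rewrite | github.com/abprenticewm/OLD_DATA_440_Card_Game | scoring.py | play_deck
-- ===== SOURCE A (Python) =====
-- def play_deck(deck_bits, p1_seq, p2_seq):
--     """Play through a single deck and return winner stats."""
--     i = 0
--     n = len(deck_bits)
--     p1_tricks = p2_tricks = 0
--     p1_cards = p2_cards = 0
--
--     while i <= n - 3:
--         window = deck_bits[i:i+3]
--         if window == p1_seq:
--             p1_tricks += 1
--             p1_cards += (i + 3)  # cards up to and including sequence
--             deck_bits = deck_bits[i+3:]  # remove used cards
--             n = len(deck_bits)
--             i = 0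
--             continue
--         elif window == p2_seq:
--             p2_tricks += 1
--             p2_cards += (i + 3)
--             deck_bits = deck_bits[i+3:]
--             n = len(deck_bits)
--             i = 0
--             continue
--         i += 1
--
--     draws_tricks = 0
--     draws_cards = 0
--     if p1_tricks == p2_tricks:
--         draws_tricks = 1
--     if p1_cards == p2_cards:
--         draws_cards = 1
--
--     return p1_tricks, p2_tricks, draws_tricks, p1_cards, p2_cards, draws_cards
-- ===== SOURCE B (Python) =====
-- def play_deck(deck_bits, p1_seq, p2_seq):
--     """Play through a single deck and return winner stats.
--
--     Two staged passes: first collect every position where either sequence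
--     matches, then greedily select non-overlapping matches left to right;
--     cards per trick = match position - previous trick end + 3.
--     """
--     n = len(deck_bits)
--     cands = []
--     for j in range(n - 2):
--         w = deck_bits[j:j + 3]
--         if w == p1_seq:
--             cands.append((j, 1))
--         elif w == p2_seq:
--             cands.append((j, 2))
--     t1 = t2 = c1 = c2 = 0
--     end = 0
--     for j, p in cands:
--         if j >= end:
--             if p == 1:
--                 t1 += 1
--                 c1 += j - end + 3
--             else:
--                 t2 += 1
--                 c2 += j - end + 3
--             end = j + 3
--     return (t1, t2, 1 if t1 == t2 else 0, c1, c2, 1 if c1 == c2 else 0)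
-- ===== Notes on version B (the rewrite author's own statement) =====
-- stated objective: alternative
-- what changed: replaces A's slice-off-the-prefix-and-restart-at-0 while loop with two staged passes: one pass collecting all match positions of either sequence, then a greedy fold selecting non-overlapping matches left to right, so no list is ever copied and no position is rescanned
import Mathlib
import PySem

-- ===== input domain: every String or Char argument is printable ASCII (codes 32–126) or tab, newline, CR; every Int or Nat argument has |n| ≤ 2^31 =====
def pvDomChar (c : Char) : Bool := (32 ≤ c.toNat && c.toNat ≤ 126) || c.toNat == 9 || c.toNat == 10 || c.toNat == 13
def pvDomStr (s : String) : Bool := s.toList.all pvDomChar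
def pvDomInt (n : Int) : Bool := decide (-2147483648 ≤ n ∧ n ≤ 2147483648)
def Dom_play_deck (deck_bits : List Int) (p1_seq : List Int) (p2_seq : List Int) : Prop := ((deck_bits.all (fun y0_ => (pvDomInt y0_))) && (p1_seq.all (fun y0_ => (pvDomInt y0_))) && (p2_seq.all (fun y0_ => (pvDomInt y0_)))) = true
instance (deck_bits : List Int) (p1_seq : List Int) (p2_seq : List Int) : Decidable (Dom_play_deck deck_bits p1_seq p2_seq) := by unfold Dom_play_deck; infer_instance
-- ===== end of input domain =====

-- B replaces A's slice-and-restart while loop with two staged passes (collect all match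
-- positions, then a greedy non-overlapping fold selecting them left to right); objective: alternative.

-- ===== PORT A =====
-- A's while loop: state (deck_bits, i, counters); i : Nat (it starts at 0 and only grows or
-- resets to 0 in Python), slices via PySem.List.slice exactly as A writes them; the fuel
-- argument only makes the recursion structural and is large enough to never run out
-- (2*len+1 strictly dominates the loop's 2*len - i measure).
def playA_loop : Nat → List Int → List Int → List Int → Nat → Int → Int → Int → Int → List Int
  | 0, _, _, _, _, t1, t2, c1, c2 =>
    [t1, t2, if t1 = t2 then 1 else 0, c1, c2, if c1 = c2 then 1 else 0]
  | fuel + 1, deck, p1, p2, i, t1, t2, c1, c2 =>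
    if i + 3 ≤ deck.length then
      let window := PySem.List.slice deck (some (i : Int)) (some ((i : Int) + 3))
      if window = p1 then
        playA_loop fuel (PySem.List.slice deck (some ((i : Int) + 3)) none) p1 p2 0
          (t1 + 1) t2 (c1 + ((i : Int) + 3)) c2
      else if window = p2 then
        playA_loop fuel (PySem.List.slice deck (some ((i : Int) + 3)) none) p1 p2 0
          t1 (t2 + 1) c1 (c2 + ((i : Int) + 3))
      else
        playA_loop fuel deck p1 p2 (i + 1) t1 t2 c1 c2
    else
      [t1, t2, if t1 = t2 then 1 else 0, c1, c2, if c1 = c2 then 1 else 0]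

def play_deck (deck_bits : List Int) (p1_seq : List Int) (p2_seq : List Int) : List Int :=
  playA_loop (2 * deck_bits.length + 1) deck_bits p1_seq p2_seq 0 0 0 0 0

-- ===== PORT B =====
-- stage 1 of Source B: the for-loop over range(n-2) appending (j, player) for each match
def playB_cands (deck p1 p2 : List Int) : List (Int × Int) :=
  (PySem.List.pyRange 0 ((deck.length : Int) - 2) 1).foldl
    (fun acc j =>
      let w := PySem.List.slice deck (some j) (some (j + 3))
      if w = p1 then acc ++ [(j, 1)]
      else if w = p2 then acc ++ [(j, 2)]
      else acc) []

-- stage 2 of Source B: greedy selection; state = (end, t1, t2, c1, c2)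
def playB_step (s : Int × Int × Int × Int × Int) (jp : Int × Int) : Int × Int × Int × Int × Int :=
  if s.1 ≤ jp.1 then
    if jp.2 = 1 then
      (jp.1 + 3, s.2.1 + 1, s.2.2.1, s.2.2.2.1 + (jp.1 - s.1 + 3), s.2.2.2.2)
    else
      (jp.1 + 3, s.2.1, s.2.2.1 + 1, s.2.2.2.1, s.2.2.2.2 + (jp.1 - s.1 + 3))
  else s

-- Source B's final return tuple
def playB_out (s : Int × Int × Int × Int × Int) : List Int :=
  [s.2.1, s.2.2.1, if s.2.1 = s.2.2.1 then 1 else 0,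
   s.2.2.2.1, s.2.2.2.2, if s.2.2.2.1 = s.2.2.2.2 then 1 else 0]

def play_deck_alt (deck_bits : List Int) (p1_seq : List Int) (p2_seq : List Int) : List Int :=
  playB_out ((playB_cands deck_bits p1_seq p2_seq).foldl playB_step (0, 0, 0, 0, 0))

-- ===== PRECONDITION & SPEC =====
def Spec_play_deck (deck_bits : List Int) (p1_seq : List Int) (p2_seq : List Int) (out : List Int) : Prop := out = play_deck_alt deck_bits p1_seq p2_seq
instance (deck_bits : List Int) (p1_seq : List Int) (p2_seq : List Int) (out : List Int) : Decidable (Spec_play_deck deck_bits p1_seq p2_seq out) := by unfold Spec_play_deck; infer_instance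

-- ===== CLAIM =====
def Claim_equal_play_deck : Prop := ∀ (deck_bits : List Int) (p1_seq : List Int) (p2_seq : List Int), Dom_play_deck deck_bits p1_seq p2_seq → Spec_play_deck deck_bits p1_seq p2_seq (play_deck deck_bits p1_seq p2_seq)

-- ===== LEMMAS AND PROOFS =====

lemma slice_add_three (xs : List Int) (i : Nat) :
    PySem.List.slice xs (some (i : Int)) (some ((i : Int) + 3)) = (xs.drop i).take 3 := by
  have h : ((i : Int) + 3) = ((i + 3 : Nat) : Int) := by push_cast; ring
  rw [h, PySem.List.slice_natCast]
  congr 1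
  omega

lemma slice_from_three (xs : List Int) (i : Nat) :
    PySem.List.slice xs (some ((i : Int) + 3)) none = xs.drop (i + 3) := by
  have h : ((i : Int) + 3) = ((i + 3 : Nat) : Int) := by push_cast; ring
  rw [h, PySem.List.slice_from_natCast]

-- proof-only intermediate form: A's loop rewritten as a single scan over the whole deck
-- with absolute index j and segment start seg.
def playMid_loop : Nat → List Int → List Int → List Int → Nat → Nat → Int → Int → Int → Int → List Int
  | 0, _, _, _, _, _, t1, t2, c1, c2 =>
    [t1, t2, if t1 = t2 then 1 else 0, c1, c2, if c1 = c2 then 1 else 0]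
  | fuel + 1, deck, p1, p2, j, seg, t1, t2, c1, c2 =>
    if j + 3 ≤ deck.length then
      let window := (deck.drop j).take 3
      if window = p1 then
        playMid_loop fuel deck p1 p2 (j + 3) (j + 3) (t1 + 1) t2
          (c1 + ((j : Int) - (seg : Int) + 3)) c2
      else if window = p2 then
        playMid_loop fuel deck p1 p2 (j + 3) (j + 3) t1 (t2 + 1) c1
          (c2 + ((j : Int) - (seg : Int) + 3))
      else
        playMid_loop fuel deck p1 p2 (j + 1) seg t1 t2 c1 c2
    else
      [t1, t2, if t1 = t2 then 1 else 0, c1, c2, if c1 = c2 then 1 else 0]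

-- A on the suffix deck.drop seg at relative index j - seg = the mid scan at absolute j, seg.
lemma loop_eq_mid (deck p1 p2 : List Int) :
    ∀ (k fA fB j seg : Nat) (t1 t2 c1 c2 : Int), deck.length - j ≤ k → seg ≤ j →
      2 * (deck.length - seg) - (j - seg) < fA → deck.length - j < fB →
      playA_loop fA (deck.drop seg) p1 p2 (j - seg) t1 t2 c1 c2 =
        playMid_loop fB deck p1 p2 j seg t1 t2 c1 c2 := by
  intro k
  induction k with
  | zero =>
    intro fA fB j seg t1 t2 c1 c2 hk hseg hfA hfB
    obtain ⟨a, rfl⟩ : ∃ a, fA = a + 1 := ⟨fA - 1, by omega⟩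
    obtain ⟨b, rfl⟩ : ∃ b, fB = b + 1 := ⟨fB - 1, by omega⟩
    have hA : ¬ (j - seg + 3 ≤ (deck.drop seg).length) := by
      simp only [List.length_drop]; omega
    have hB : ¬ (j + 3 ≤ deck.length) := by omega
    rw [playA_loop, playMid_loop, if_neg hA, if_neg hB]
  | succ k ih =>
    intro fA fB j seg t1 t2 c1 c2 hk hseg hfA hfB
    obtain ⟨a, rfl⟩ : ∃ a, fA = a + 1 := ⟨fA - 1, by omega⟩
    obtain ⟨b, rfl⟩ : ∃ b, fB = b + 1 := ⟨fB - 1, by omega⟩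
    by_cases hB : j + 3 ≤ deck.length
    · have hA : j - seg + 3 ≤ (deck.drop seg).length := by
        simp only [List.length_drop]; omega
      have hwin : PySem.List.slice (deck.drop seg) (some ((j - seg : Nat) : Int))
          (some (((j - seg : Nat) : Int) + 3)) = (deck.drop j).take 3 := by
        rw [slice_add_three, List.drop_drop]
        congr 2
        omega
      have hdrop : (deck.drop seg).drop (j - seg + 3) = deck.drop (j + 3) := by
        rw [List.drop_drop]; congr 1; omega
      have hcard : ((j - seg : Nat) : Int) + 3 = (j : Int) - (seg : Int) + 3 := by
        push_cast [hseg]; ring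
      rw [playA_loop, playMid_loop, if_pos hA, if_pos hB]
      simp only [hwin, slice_from_three, hdrop]
      by_cases h1 : (deck.drop j).take 3 = p1
      · rw [if_pos h1, if_pos h1, hcard]
        have h0 : j + 3 - (j + 3) = 0 := by omega
        have := ih a b (j + 3) (j + 3) (t1 + 1) t2 (c1 + ((j : Int) - (seg : Int) + 3)) c2
          (by omega) (by omega) (by omega) (by omega)
        rwa [h0] at this
      · rw [if_neg h1, if_neg h1]
        by_cases h2 : (deck.drop j).take 3 = p2
        · rw [if_pos h2, if_pos h2, hcard]
          have h0 : j + 3 - (j + 3) = 0 := by omega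
          have := ih a b (j + 3) (j + 3) t1 (t2 + 1) c1 (c2 + ((j : Int) - (seg : Int) + 3))
            (by omega) (by omega) (by omega) (by omega)
          rwa [h0] at this
        · rw [if_neg h2, if_neg h2, show j - seg + 1 = (j + 1) - seg from by omega]
          exact ih a b (j + 1) seg t1 t2 c1 c2 (by omega) (by omega) (by omega) (by omega)
    · have hA : ¬ (j - seg + 3 ≤ (deck.drop seg).length) := by
        simp only [List.length_drop]; omega
      rw [playA_loop, playMid_loop, if_neg hA, if_neg hB]

-- candidate list from position j onwards (proof-only)
def candFrom (deck p1 p2 : List Int) (j : Nat) : List (Int × Int) :=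
  if h : j + 3 ≤ deck.length then
    (if (deck.drop j).take 3 = p1 then [((j : Int), 1)]
     else if (deck.drop j).take 3 = p2 then [((j : Int), 2)] else [])
      ++ candFrom deck p1 p2 (j + 1)
  else []
termination_by deck.length - j

lemma candFrom_eq_nil (deck p1 p2 : List Int) (j : Nat) (h : ¬ j + 3 ≤ deck.length) :
    candFrom deck p1 p2 j = [] := by
  rw [candFrom, dif_neg h]

-- stage 1 of B equals candFrom 0
lemma cands_eq_candFrom (deck p1 p2 : List Int) :
    ∀ (k j : Nat) (acc : List (Int × Int)), deck.length - j ≤ k →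
      (PySem.List.pyRange (j : Int) ((deck.length : Int) - 2) 1).foldl
        (fun acc j =>
          let w := PySem.List.slice deck (some j) (some (j + 3))
          if w = p1 then acc ++ [(j, 1)]
          else if w = p2 then acc ++ [(j, 2)]
          else acc) acc = acc ++ candFrom deck p1 p2 j := by
  intro k
  induction k with
  | zero =>
    intro j acc hk
    rw [PySem.List.pyRange_one_eq_nil (by omega), candFrom_eq_nil deck p1 p2 j (by omega)]
    simp
  | succ k ih =>
    intro j acc hk
    by_cases hj : j + 3 ≤ deck.length
    · rw [PySem.List.pyRange_one_cons (by omega : (j : Int) < (deck.length : Int) - 2)]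
      rw [candFrom, dif_pos hj]
      simp only [List.foldl_cons, slice_add_three]
      have h1 : ((j : Int) + 1) = ((j + 1 : Nat) : Int) := by push_cast; ring
      by_cases hw1 : (deck.drop j).take 3 = p1
      · rw [if_pos hw1, if_pos hw1, h1, ih (j + 1) _ (by omega), List.append_assoc]
      · rw [if_neg hw1, if_neg hw1]
        by_cases hw2 : (deck.drop j).take 3 = p2
        · rw [if_pos hw2, if_pos hw2, h1, ih (j + 1) _ (by omega), List.append_assoc]
        · rw [if_neg hw2, if_neg hw2, h1, ih (j + 1) _ (by omega), List.nil_append]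
    · rw [PySem.List.pyRange_one_eq_nil (by omega), candFrom_eq_nil deck p1 p2 j (by omega)]
      simp

-- skipping: candidates strictly below the current end are dropped by the greedy fold
lemma fold_skip (deck p1 p2 : List Int) :
    ∀ (m k tgt : Nat) (σ : Int × Int × Int × Int × Int), tgt - k ≤ m → k ≤ tgt → σ.1 = (tgt : Int) →
      (candFrom deck p1 p2 k).foldl playB_step σ = (candFrom deck p1 p2 tgt).foldl playB_step σ := by
  intro m
  induction m with
  | zero =>
    intro k tgt σ hm hk _
    have : k = tgt := by omega
    subst this; rfl
  | succ m ih =>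
    intro k tgt σ hm hk hσ
    by_cases he : k = tgt
    · subst he; rfl
    · have hk' : k < tgt := by omega
      by_cases hlen : k + 3 ≤ deck.length
      · rw [candFrom, dif_pos hlen]
        have hskip : ∀ p : Int, playB_step σ ((k : Int), p) = σ := by
          intro p
          unfold playB_step
          rw [if_neg (by rw [hσ]; push_cast; omega)]
        by_cases hw1 : (deck.drop k).take 3 = p1
        · rw [if_pos hw1]
          simp only [List.cons_append, List.nil_append, List.foldl_cons, hskip]
          exact ih (k + 1) tgt σ (by omega) (by omega) hσ
        · rw [if_neg hw1]
          by_cases hw2 : (deck.drop k).take 3 = p2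
          · rw [if_pos hw2]
            simp only [List.cons_append, List.nil_append, List.foldl_cons, hskip]
            exact ih (k + 1) tgt σ (by omega) (by omega) hσ
          · rw [if_neg hw2, List.nil_append]
            exact ih (k + 1) tgt σ (by omega) (by omega) hσ
      · rw [candFrom_eq_nil deck p1 p2 k (by omega),
          candFrom_eq_nil deck p1 p2 tgt (by omega)]

-- the mid scan equals the greedy fold over candFrom
lemma mid_eq_fold (deck p1 p2 : List Int) :
    ∀ (k fB j seg : Nat) (t1 t2 c1 c2 : Int), deck.length - j ≤ k → seg ≤ j →
      deck.length - j < fB →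
      playMid_loop fB deck p1 p2 j seg t1 t2 c1 c2 =
        playB_out ((candFrom deck p1 p2 j).foldl playB_step ((seg : Int), t1, t2, c1, c2)) := by
  intro k
  induction k with
  | zero =>
    intro fB j seg t1 t2 c1 c2 hk hseg hfB
    obtain ⟨b, rfl⟩ : ∃ b, fB = b + 1 := ⟨fB - 1, by omega⟩
    rw [playMid_loop, if_neg (by omega), candFrom_eq_nil deck p1 p2 j (by omega)]
    rfl
  | succ k ih =>
    intro fB j seg t1 t2 c1 c2 hk hseg hfB
    obtain ⟨b, rfl⟩ : ∃ b, fB = b + 1 := ⟨fB - 1, by omega⟩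
    by_cases hj : j + 3 ≤ deck.length
    · rw [playMid_loop, if_pos hj, candFrom, dif_pos hj]
      have htake : ∀ p : Int,
          playB_step ((seg : Int), t1, t2, c1, c2) ((j : Int), p) =
            (if p = 1 then ((j : Int) + 3, t1 + 1, t2, c1 + ((j : Int) - (seg : Int) + 3), c2)
             else ((j : Int) + 3, t1, t2 + 1, c1, c2 + ((j : Int) - (seg : Int) + 3))) := by
        intro p
        unfold playB_step
        rw [if_pos (by push_cast; omega)]
      have hj3 : ((j : Int) + 3) = ((j + 3 : Nat) : Int) := by push_cast; ring
      by_cases hw1 : (deck.drop j).take 3 = p1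
      · rw [if_pos hw1, if_pos hw1]
        simp only [List.cons_append, List.nil_append, List.foldl_cons, htake]
        rw [hj3, fold_skip deck p1 p2 (j + 3) (j + 1) (j + 3) _ (by omega) (by omega) rfl]
        exact ih b (j + 3) (j + 3) (t1 + 1) t2 (c1 + ((j : Int) - (seg : Int) + 3)) c2
          (by omega) (by omega) (by omega)
      · rw [if_neg hw1, if_neg hw1]
        by_cases hw2 : (deck.drop j).take 3 = p2
        · rw [if_pos hw2, if_pos hw2]
          simp only [List.cons_append, List.nil_append, List.foldl_cons, htake]
          rw [if_neg (by norm_num)]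
          rw [hj3, fold_skip deck p1 p2 (j + 3) (j + 1) (j + 3) _ (by omega) (by omega) rfl]
          exact ih b (j + 3) (j + 3) t1 (t2 + 1) c1 (c2 + ((j : Int) - (seg : Int) + 3))
            (by omega) (by omega) (by omega)
        · rw [if_neg hw2, if_neg hw2, List.nil_append]
          exact ih b (j + 1) seg t1 t2 c1 c2 (by omega) (by omega) (by omega)
    · rw [playMid_loop, if_neg hj, candFrom_eq_nil deck p1 p2 j hj]
      rfl

-- ===== VERDICT =====
theorem play_deck_spec : Claim_equal_play_deck := by
  intro deck p1 p2 _
  unfold Spec_play_deck play_deck play_deck_alt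
  have h1 := loop_eq_mid deck p1 p2 deck.length (2 * deck.length + 1) (deck.length + 1)
    0 0 0 0 0 0 (by omega) (by omega) (by omega) (by omega)
  have h2 := mid_eq_fold deck p1 p2 deck.length (deck.length + 1) 0 0 0 0 0 0
    (by omega) (by omega) (by omega)
  have h3 := cands_eq_candFrom deck p1 p2 deck.length 0 [] (by omega)
  rw [playB_cands]
  simp only [Nat.cast_zero] at h3 ⊢
  rw [h3, List.nil_append]
  simpa using h1.trans h2
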